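-- pv_equiv track=rewrite | github.com/koistav1212/AcuTrader-backend | ml_service/news_ingest.py | apply_category_quotas
-- ===== SOURCE A (Python) =====
-- from collections import defaultdict
--
-- def apply_category_quotas(articles, quota_per_category=2, total_limit=10):
--     """
--     Returns balanced articles with max N per category.
--     Ensures diverse summary (Bloomberg style).
--     """
--     bucket = defaultdict(list)
--
--     for article in articles:
--         category = article.get('_category', 'general')
--         bucket[category].append(article)
--
--     final = []
--
--     # Priority order
--     priority_categories = ["earnings", "analyst", "corporate", "management", "regulation", "general"]
--
--     for cat in priority_categories:
--         if cat in bucket: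
--             final.extend(bucket[cat][:quota_per_category])
--
--     # Fill remaining with any leftover high-scoring articles
--     if len(final) < total_limit:
--         all_remaining = [a for a in articles if a not in final]
--         final.extend(all_remaining[:total_limit - len(final)])
--
--     return final[:total_limit]
-- ===== SOURCE B (Python) =====
-- def apply_category_quotas(articles, quota_per_category=2, total_limit=10):
--     """Balanced articles with max N per category. Selection is a flat
--     comprehension over priority categories (no bucket index); the fill phase is
--     a single counted pass over the source instead of building the full
--     remainder list and slicing it."""
--     priority_categories = ["earnings", "analyst", "corporate", "management", "regulation", "general"]
--     final = [a for cat in priority_categories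
--                for a in [x for x in articles
--                          if x.get('_category', 'general') == cat][:quota_per_category]]
--     need = total_limit - len(final)
--     if need > 0:
--         chosen = list(final)
--         for a in articles:
--             if need <= 0:
--                 break
--             if a not in chosen:
--                 final.append(a)
--                 need -= 1
--     return final[:total_limit]
-- ===== Notes on version B (the rewrite author's own statement) =====
-- stated objective: alternative
-- what changed: B drops A's defaultdict bucketing in favour of a flat per-priority-category comprehension over the source list, and replaces A's build-the-whole-remainder-then-slice fill phase with a single counted pass that appends articles not already chosen until the quota is met.
import Mathlib
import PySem

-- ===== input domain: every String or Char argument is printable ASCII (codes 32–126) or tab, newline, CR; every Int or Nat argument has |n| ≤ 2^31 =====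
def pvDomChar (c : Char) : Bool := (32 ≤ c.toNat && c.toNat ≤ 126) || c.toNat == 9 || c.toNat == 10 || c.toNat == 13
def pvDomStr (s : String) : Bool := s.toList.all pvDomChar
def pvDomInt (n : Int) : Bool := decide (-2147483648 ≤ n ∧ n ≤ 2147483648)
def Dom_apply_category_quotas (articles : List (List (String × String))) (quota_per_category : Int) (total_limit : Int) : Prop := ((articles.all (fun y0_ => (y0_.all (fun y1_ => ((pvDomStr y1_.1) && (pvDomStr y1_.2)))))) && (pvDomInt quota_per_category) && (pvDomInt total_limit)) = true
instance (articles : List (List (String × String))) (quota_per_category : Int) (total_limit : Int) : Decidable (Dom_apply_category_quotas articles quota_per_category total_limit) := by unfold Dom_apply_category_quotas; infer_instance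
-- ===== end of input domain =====

-- B replaces A's defaultdict bucketing with a flat per-priority-category comprehension and
-- replaces A's build-remainder-then-slice fill with a counted single pass (objective: alternative; same cost).

-- ===== PORT A =====
-- shared Python-semantics helpers: article.get('_category','general'), dict == (order-insensitive), 'a in final'
def pvCat (a : List (String × String)) : String :=
  (PySem.Dict.mk a).getD "_category" "general"

def pvDictEq (x y : List (String × String)) : Bool :=
  (x.all fun p => (PySem.Dict.mk y).get? p.1 == some p.2) &&
  (y.all fun p => (PySem.Dict.mk x).get? p.1 == some p.2)

def pvMem (a : List (String × String)) (final : List (List (String × String))) : Bool :=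
  final.any (fun b => pvDictEq a b)

def pvPriority : List String :=
  ["earnings", "analyst", "corporate", "management", "regulation", "general"]

def apply_category_quotas (articles : List (List (String × String))) (quota_per_category : Int) (total_limit : Int) : List (List (String × String)) :=
  let bucket : PySem.Dict String (List (List (String × String))) :=
    articles.foldl (fun d a => d.modify (pvCat a) [] (· ++ [a])) PySem.Dict.empty
  let final : List (List (String × String)) :=
    pvPriority.foldl
      (fun f cat =>
        if bucket.contains cat then
          f ++ PySem.List.slice (bucket.getD cat []) none (some quota_per_category)
        else f) []
  let final :=
    if (final.length : Int) < total_limit then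
      final ++ PySem.List.slice (articles.filter (fun a => !(pvMem a final))) none
        (some (total_limit - (final.length : Int)))
    else final
  PySem.List.slice final none (some total_limit)

-- ===== PORT B =====
def apply_category_quotas_alt (articles : List (List (String × String))) (quota_per_category : Int) (total_limit : Int) : List (List (String × String)) :=
  let final : List (List (String × String)) :=
    pvPriority.flatMap (fun cat =>
      PySem.List.slice (articles.filter (fun x => pvCat x == cat)) none (some quota_per_category))
  let need : Int := total_limit - (final.length : Int)
  let final :=
    if 0 < need then
      -- 'for a in articles: if need <= 0: break; if a not in chosen: final.append(a); need -= 1'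
      (articles.foldl
        (fun (s : List (List (String × String)) × Int) a =>
          if s.2 ≤ 0 then s
          else if pvMem a final then s
          else (s.1 ++ [a], s.2 - 1))
        (final, need)).1
    else final
  PySem.List.slice final none (some total_limit)

-- ===== PRECONDITION & SPEC =====
def Spec_apply_category_quotas (articles : List (List (String × String))) (quota_per_category : Int) (total_limit : Int) (out : List (List (String × String))) : Prop := out = apply_category_quotas_alt articles quota_per_category total_limit
instance (articles : List (List (String × String))) (quota_per_category : Int) (total_limit : Int) (out : List (List (String × String))) : Decidable (Spec_apply_category_quotas articles quota_per_category total_limit out) := by unfold Spec_apply_category_quotas; infer_instance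

-- ===== CLAIM (what is proved, stated in full; the proofs are below) =====
def Claim_equal_apply_category_quotas : Prop := ∀ (articles : List (List (String × String))) (quota_per_category : Int) (total_limit : Int), Dom_apply_category_quotas articles quota_per_category total_limit → Spec_apply_category_quotas articles quota_per_category total_limit (apply_category_quotas articles quota_per_category total_limit)

-- ===== LEMMAS AND PROOFS =====
-- the grouping loop of A, read back: value at a key is the ordered filter of the processed articles
theorem pv_bucket_getD (l : List (List (String × String)))
    (d : PySem.Dict String (List (List (String × String)))) (cat : String) :
    (l.foldl (fun d a => d.modify (pvCat a) [] (· ++ [a])) d).getD cat []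
      = d.getD cat [] ++ l.filter (fun a => pvCat a == cat) := by
  induction l generalizing d with
  | nil => simp
  | cons a l ih =>
    simp only [List.foldl_cons, List.filter_cons, ih, PySem.Dict.getD_modify]
    by_cases h : pvCat a = cat
    · simp [h]
    · simp [h, Ne.symm h, beq_iff_eq]

theorem pv_bucket_contains (l : List (List (String × String)))
    (d : PySem.Dict String (List (List (String × String)))) (cat : String) :
    (l.foldl (fun d a => d.modify (pvCat a) [] (· ++ [a])) d).contains cat
      = (d.contains cat || l.any (fun a => pvCat a == cat)) := by
  induction l generalizing d with
  | nil => simp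
  | cons a l ih =>
    simp only [List.foldl_cons, List.any_cons, ih, PySem.Dict.contains_modify]
    by_cases h : pvCat a = cat
    · simp [h]
    · have h1 : (cat == pvCat a) = false := by simpa [beq_iff_eq] using Ne.symm h
      have h2 : (pvCat a == cat) = false := by simpa [beq_iff_eq] using h
      simp [h1, h2]

theorem pv_slice_nil (a b : Option Int) :
    PySem.List.slice ([] : List (List (String × String))) a b = [] := by
  simp [PySem.List.slice]

-- one priority step of A equals the corresponding flatMap component of B
theorem pv_step (articles : List (List (String × String))) (q : Int)
    (f : List (List (String × String))) (cat : String) :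
    (if (articles.foldl (fun d a => d.modify (pvCat a) [] (· ++ [a])) PySem.Dict.empty).contains cat then
        f ++ PySem.List.slice
          ((articles.foldl (fun d a => d.modify (pvCat a) [] (· ++ [a])) PySem.Dict.empty).getD cat [])
          none (some q)
      else f)
      = f ++ PySem.List.slice (articles.filter (fun a => pvCat a == cat)) none (some q) := by
  rw [pv_bucket_getD, pv_bucket_contains]
  simp only [PySem.Dict.getD_empty, PySem.Dict.contains_empty, List.nil_append, Bool.false_or]
  by_cases h : articles.any (fun a => pvCat a == cat)
  · simp [h]
  · have hf : articles.filter (fun a => pvCat a == cat) = [] := by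
      rw [List.filter_eq_nil_iff]
      intro a ha
      have hh := (Bool.not_eq_true _).mp h
      rw [List.any_eq_false] at hh
      simpa using hh a ha
    simp [h, hf, pv_slice_nil]

-- the counted fill loop of B is inert once the counter is ≤ 0
theorem pv_fill_done {α : Type} (l : List α) (p : α → Bool)
    (acc : List α) (n : Int) (h : n ≤ 0) :
    (l.foldl (fun (s : List α × Int) a =>
        if s.2 ≤ 0 then s else if p a then s else (s.1 ++ [a], s.2 - 1)) (acc, n))
      = (acc, n) := by
  induction l with
  | nil => rfl
  | cons a l ih => simp [h, ih]

-- the counted fill loop of B, read back: it appends the first n.toNat articles passing the test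
theorem pv_fill {α : Type} (l : List α) (p : α → Bool)
    (acc : List α) (n : Int) :
    (l.foldl (fun (s : List α × Int) a =>
        if s.2 ≤ 0 then s else if p a then s else (s.1 ++ [a], s.2 - 1)) (acc, n)).1
      = acc ++ (l.filter (fun a => !(p a))).take n.toNat := by
  induction l generalizing acc n with
  | nil => simp
  | cons a l ih =>
    by_cases hn : n ≤ 0
    · have := pv_fill_done (a :: l) p acc n hn
      rw [this]
      have : n.toNat = 0 := by omega
      simp [this]
    · simp only [List.foldl_cons, if_neg hn, List.filter_cons]
      by_cases hp : p a
      · simp [hp, ih]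
      · have ht : n.toNat = (n - 1).toNat + 1 := by omega
        rw [ht]
        simp [hp, ih]

-- ===== VERDICT (by name: the statement is the Claim_ definition above) =====
theorem apply_category_quotas_spec : Claim_equal_apply_category_quotas := by
  intro articles q t _
  show _ = _
  simp only [apply_category_quotas, apply_category_quotas_alt, pv_step,
    PySem.List.foldl_append_eq_flatMap, List.nil_append]
  set fin := pvPriority.flatMap (fun cat =>
    PySem.List.slice (articles.filter (fun x => pvCat x == cat)) none (some q)) with hfin
  by_cases hc : (fin.length : Int) < t
  · have hc' : 0 < t - (fin.length : Int) := by omega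
    rw [if_pos hc, if_pos hc', pv_fill,
      PySem.List.slice_to (articles.filter (fun a => !(pvMem a fin))) (le_of_lt hc')]
  · have hc' : ¬ 0 < t - (fin.length : Int) := by omega
    rw [if_neg hc, if_neg hc']
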